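-- pv_equiv track=rewrite | github.com/qhrhkd550/Algorithm | week_3/베스트앨범.py | solution
-- ===== SOURCE A (Python) =====
-- def solution(genres, plays):
--     answer = []
--
--     data = {}
--     for i, (genre, play) in enumerate(zip(genres, plays)):
--         if genre not in data:
--             data[genre] = {'total' : play,
--                           'id' : [[i, play]]}
--         else:
--             data[genre]['total'] += play
--             data[genre]['id'].append([i, play])
--
--     for key in data.keys():
--         data[key]['id'] = sorted(data[key]['id'], key=lambda x : (-x[1], x[0]))
--
--     data = sorted(data.items(), key=lambda x : -x[1]['total'])
--
--     for i in range(len(data)):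
--         if len(data[i][1]['id']) == 1:
--             answer.append(data[i][1]['id'][0][0])
--         else:
--             for j in range(2):
--                 answer.append(data[i][1]['id'][j][0])
--
--     return answer
-- ===== SOURCE B (Python) =====
-- def solution(genres, plays):
--     songs = list(zip(genres, plays))
--     total = {}
--     order = {}
--     for g, p in songs:
--         if g not in order:
--             order[g] = len(order)
--             total[g] = 0
--         total[g] += p
--     idx = sorted(range(len(songs)),
--                  key=lambda i: (-total[songs[i][0]], order[songs[i][0]], -songs[i][1], i))
--     answer = []
--     count = {}
--     for i in idx:
--         g = songs[i][0]
--         c = count.get(g, 0)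
--         if c < 2:
--             answer.append(i)
--             count[g] = c + 1
--     return answer
-- ===== Notes on version B (the rewrite author's own statement) =====
-- stated objective: alternative
-- what changed: A groups songs per genre, sorts each genre's songs, sorts the genre groups by total plays and takes the top two of each; B instead performs one global sort of all song indices under the composite key (-genre total, genre first-appearance rank, -play, index) followed by a single linear counting pass that keeps at most two indices per genre.
import Mathlib
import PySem

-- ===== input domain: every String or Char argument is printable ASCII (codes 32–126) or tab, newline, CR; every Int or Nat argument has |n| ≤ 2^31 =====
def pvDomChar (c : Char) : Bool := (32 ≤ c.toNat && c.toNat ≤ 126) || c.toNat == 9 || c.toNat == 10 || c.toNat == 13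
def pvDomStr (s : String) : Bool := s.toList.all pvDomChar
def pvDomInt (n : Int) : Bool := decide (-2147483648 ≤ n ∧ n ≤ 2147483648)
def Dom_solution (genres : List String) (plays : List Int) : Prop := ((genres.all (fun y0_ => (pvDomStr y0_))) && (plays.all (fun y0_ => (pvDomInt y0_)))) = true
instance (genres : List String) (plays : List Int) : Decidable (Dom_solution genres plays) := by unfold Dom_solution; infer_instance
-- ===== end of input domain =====

-- B replaces A's per-genre sorts + genre sort by one global sort of all song
-- indices under the composite key (-genre total, genre first-appearance rank, -play, index)
-- followed by a single counting pass keeping at most two songs per genre (alternative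
-- decomposition, same exact output).

-- ===== PORT A =====
def solution (genres : List String) (plays : List Int) : List Int :=
  let data0 : PySem.Dict String (Int × List (Int × Int)) :=
    (PySem.List.enumerate (List.zip genres plays)).foldl (fun d s =>
      if d.contains s.2.1 = false then
        d.insert s.2.1 (s.2.2, [(s.1, s.2.2)])
      else
        d.modify s.2.1 (0, []) (fun tv => (tv.1 + s.2.2, tv.2 ++ [(s.1, s.2.2)]))) PySem.Dict.empty
  let data1 := data0.keys.foldl (fun d k =>
      d.modify k (0, []) (fun tv => (tv.1, PySem.List.sorted tv.2 (fun x => toLex (-x.2, x.1))))) data0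
  let dataL := PySem.List.sorted data1.items (fun x => -x.2.1)
  (PySem.List.pyRange 0 (PySem.List.len dataL) 1).foldl (fun ans i =>
    let e := PySem.List.pyGetD dataL i ("", (0, []))
    if PySem.List.len e.2.2 = 1 then
      ans ++ [(PySem.List.pyGetD e.2.2 0 (0, 0)).1]
    else
      (PySem.List.pyRange 0 2 1).foldl (fun ans j =>
        ans ++ [(PySem.List.pyGetD e.2.2 j (0, 0)).1]) ans) []

-- ===== PORT B =====
def solution_alt (genres : List String) (plays : List Int) : List Int :=
  let songs := List.zip genres plays
  let tp := songs.foldl (fun (st : PySem.Dict String Int × PySem.Dict String Int) gp =>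
      let st' := if st.2.contains gp.1 = false then
          (st.1.insert gp.1 0, st.2.insert gp.1 (st.2.size : Int)) else st
      (st'.1.modify gp.1 0 (· + gp.2), st'.2)) (PySem.Dict.empty, PySem.Dict.empty)
  let idx := PySem.List.sorted (PySem.List.pyRange 0 (PySem.List.len songs) 1)
    (fun i => toLex (-(tp.1.getD (PySem.List.pyGetD songs i ("", 0)).1 0),
      toLex (tp.2.getD (PySem.List.pyGetD songs i ("", 0)).1 0,
        toLex (-(PySem.List.pyGetD songs i ("", 0)).2, i))))
  (idx.foldl (fun (st : List Int × PySem.Dict String Int) i =>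
      let g := (PySem.List.pyGetD songs i ("", 0)).1
      let c := st.2.getD g 0
      if c < 2 then (st.1 ++ [i], st.2.insert g (c + 1)) else st) ([], PySem.Dict.empty)).1

-- ===== PRECONDITION & SPEC =====
def Spec_solution (genres : List String) (plays : List Int) (out : List Int) : Prop := out = solution_alt genres plays
instance (genres : List String) (plays : List Int) (out : List Int) : Decidable (Spec_solution genres plays out) := by unfold Spec_solution; infer_instance

-- ===== CLAIM (what is proved, stated in full; the proofs are below) =====
def Claim_equal_solution : Prop := ∀ (genres : List String) (plays : List Int), Dom_solution genres plays → Spec_solution genres plays (solution genres plays)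

-- ===== LEMMAS AND PROOFS =====

-- proof-side copies of the two bodies, over the shared zipped song list
def zSongs (zs : List (String × Int)) : List (Int × String × Int) := PySem.List.enumerate zs 0
def zGs (zs : List (String × Int)) : List String := PySem.Set.ofList (zs.map Prod.fst)
def zEnts (zs : List (String × Int)) (g : String) : List (Int × Int) :=
  ((zSongs zs).filter (fun s => s.2.1 == g)).map (fun s => (s.1, s.2.2))
def zSents (zs : List (String × Int)) (g : String) : List (Int × Int) :=
  PySem.List.sorted (zEnts zs g) (fun x => toLex (-x.2, x.1))
def zTot (zs : List (String × Int)) (g : String) : Int :=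
  (((zSongs zs).filter (fun s => s.2.1 == g)).map (fun s => s.2.2)).sum
def zF (zs : List (String × Int)) (g : String) : String × Int × List (Int × Int) :=
  (g, (zTot zs g, zSents zs g))
def zItems (zs : List (String × Int)) : List (String × Int × List (Int × Int)) :=
  (zGs zs).map (zF zs)
def zDataL (zs : List (String × Int)) : List (String × Int × List (Int × Int)) :=
  PySem.List.sorted (zItems zs) (fun x => -x.2.1)

def aRun (zs : List (String × Int)) : List Int :=
  let data0 : PySem.Dict String (Int × List (Int × Int)) :=
    (PySem.List.enumerate zs).foldl (fun d s =>
      if d.contains s.2.1 = false then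
        d.insert s.2.1 (s.2.2, [(s.1, s.2.2)])
      else
        d.modify s.2.1 (0, []) (fun tv => (tv.1 + s.2.2, tv.2 ++ [(s.1, s.2.2)]))) PySem.Dict.empty
  let data1 := data0.keys.foldl (fun d k =>
      d.modify k (0, []) (fun tv => (tv.1, PySem.List.sorted tv.2 (fun x => toLex (-x.2, x.1))))) data0
  let dataL := PySem.List.sorted data1.items (fun x => -x.2.1)
  (PySem.List.pyRange 0 (PySem.List.len dataL) 1).foldl (fun ans i =>
    let e := PySem.List.pyGetD dataL i ("", (0, []))
    if PySem.List.len e.2.2 = 1 then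
      ans ++ [(PySem.List.pyGetD e.2.2 0 (0, 0)).1]
    else
      (PySem.List.pyRange 0 2 1).foldl (fun ans j =>
        ans ++ [(PySem.List.pyGetD e.2.2 j (0, 0)).1]) ans) []

def bStep : (PySem.Dict String Int × PySem.Dict String Int) → (String × Int) →
    (PySem.Dict String Int × PySem.Dict String Int) := fun st gp =>
  let st' := if st.2.contains gp.1 = false then
      (st.1.insert gp.1 0, st.2.insert gp.1 (st.2.size : Int)) else st
  (st'.1.modify gp.1 0 (· + gp.2), st'.2)

def bDicts (zs : List (String × Int)) : PySem.Dict String Int × PySem.Dict String Int :=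
  zs.foldl bStep (PySem.Dict.empty, PySem.Dict.empty)

def bKey (zs : List (String × Int)) (i : Int) : Lex (Int × Lex (Int × Lex (Int × Int))) :=
  toLex (-((bDicts zs).1.getD (PySem.List.pyGetD zs i ("", 0)).1 0),
    toLex ((bDicts zs).2.getD (PySem.List.pyGetD zs i ("", 0)).1 0,
      toLex (-(PySem.List.pyGetD zs i ("", 0)).2, i)))

def bPStep (zs : List (String × Int)) : (List Int × PySem.Dict String Int) → Int →
    (List Int × PySem.Dict String Int) := fun st i =>
  let g := (PySem.List.pyGetD zs i ("", 0)).1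
  let c := st.2.getD g 0
  if c < 2 then (st.1 ++ [i], st.2.insert g (c + 1)) else st

def bRun (zs : List (String × Int)) : List Int :=
  ((PySem.List.sorted (PySem.List.pyRange 0 (PySem.List.len zs) 1) (bKey zs)).foldl
    (bPStep zs) ([], PySem.Dict.empty)).1

theorem aRun_spec (genres : List String) (plays : List Int) :
    solution genres plays = aRun (List.zip genres plays) := rfl

theorem bRun_spec (genres : List String) (plays : List Int) :
    solution_alt genres plays = bRun (List.zip genres plays) := rfl

-- ---------- enumerate facts ----------

theorem enum_map_snd (l : List (String × Int)) : ∀ s : Int,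
    (PySem.List.enumerate l s).map Prod.snd = l := by
  induction l with
  | nil => intro s; simp [PySem.List.enumerate]
  | cons x t ih => intro s; simp [PySem.List.enumerate, ih]

theorem enum_map_fst (l : List (String × Int)) : ∀ s : Int,
    (PySem.List.enumerate l s).map Prod.fst = PySem.List.pyRange s (s + l.length) 1 := by
  induction l with
  | nil => intro s; simp [PySem.List.enumerate, PySem.List.pyRange_one_eq_nil]
  | cons x t ih =>
    intro s
    have h : s < s + ((x :: t).length : Int) := by
      simp only [List.length_cons]; push_cast; omega
    rw [PySem.List.pyRange_one_cons h]
    simp only [PySem.List.enumerate, List.map_cons, ih (s + 1)]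
    have h2 : s + 1 + (t.length : Int) = s + ((x :: t).length : Int) := by
      simp only [List.length_cons]; push_cast; omega
    rw [h2]

theorem enum_mem {l : List (String × Int)} : ∀ {s : Int} {p : Int × String × Int},
    p ∈ PySem.List.enumerate l s → ∃ k : Nat, p.1 = s + k ∧ l[k]? = some p.2 := by
  induction l with
  | nil => intro s p h; simp [PySem.List.enumerate] at h
  | cons x t ih =>
    intro s p h
    simp only [PySem.List.enumerate, List.mem_cons] at h
    rcases h with h | h
    · exact ⟨0, by simp [h], by simp [h]⟩
    · obtain ⟨k, hk1, hk2⟩ := ih h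
      exact ⟨k + 1, by push_cast; omega, by simpa using hk2⟩

theorem enum_filter_map (g : String) (l : List (String × Int)) : ∀ s : Int,
    ((PySem.List.enumerate l s).filter (fun p => p.2.1 == g)).map (fun p => p.2.2) =
      (l.filter (fun z => z.1 == g)).map (fun z => z.2) := by
  induction l with
  | nil => intro s; simp [PySem.List.enumerate]
  | cons x t ih =>
    intro s
    simp only [PySem.List.enumerate, List.filter_cons]
    by_cases h : (x.1 == g) = true <;> simp [h, ih (s + 1)]

-- ---------- A's grouping dict ----------

theorem a_step_eq (d : PySem.Dict String (Int × List (Int × Int))) (s : Int × String × Int) :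
    (if d.contains s.2.1 = false then
        d.insert s.2.1 (s.2.2, [(s.1, s.2.2)])
      else
        d.modify s.2.1 (0, []) (fun tv => (tv.1 + s.2.2, tv.2 ++ [(s.1, s.2.2)]))) =
      d.modify s.2.1 (0, []) (fun tv => (tv.1 + s.2.2, tv.2 ++ [(s.1, s.2.2)])) := by
  cases h : d.contains s.2.1
  · simp only [PySem.Dict.modify, PySem.Dict.getD_of_not_contains d _ h]
    simp
  · simp

theorem groupFold (c : String) : ∀ (l : List (Int × String × Int))
    (d : PySem.Dict String (Int × List (Int × Int))),
    (l.foldl (fun d s => d.modify s.2.1 (0, [])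
        (fun tv => (tv.1 + s.2.2, tv.2 ++ [(s.1, s.2.2)]))) d).getD c (0, []) =
      ((d.getD c (0, [])).1 + ((l.filter (fun s => s.2.1 == c)).map (fun s => s.2.2)).sum,
       (d.getD c (0, [])).2 ++ (l.filter (fun s => s.2.1 == c)).map (fun s => (s.1, s.2.2))) := by
  intro l
  induction l with
  | nil => intro d; simp
  | cons x t ih =>
    intro d
    simp only [List.foldl_cons, ih, PySem.Dict.getD_modify]
    by_cases h : c = x.2.1
    · simp [h, add_assoc]
    · have h' : ¬(x.2.1 == c) = true := by simpa using fun e => h e.symm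
      simp [h, h']

theorem modifyEachD {ν : Type} (f : ν → ν) (d0 : ν) (c : String) :
    ∀ (l : List String) (d : PySem.Dict String ν), l.Nodup →
    (l.foldl (fun d k => d.modify k d0 f) d).getD c d0 =
      if c ∈ l then f (d.getD c d0) else d.getD c d0 := by
  intro l
  induction l with
  | nil => intro d _; simp
  | cons k t ih =>
    intro d hnd
    rw [List.nodup_cons] at hnd
    simp only [List.foldl_cons, ih _ hnd.2]
    by_cases h : c = k
    · subst h
      simp [hnd.1]
    · simp [h, PySem.Dict.getD_modify, List.mem_cons]

-- the A-side dict pipeline, characterized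
theorem a_data0_keys (zs : List (String × Int)) :
    ((zSongs zs).foldl (fun d s => d.modify s.2.1 (0, [])
        (fun tv => (tv.1 + s.2.2, tv.2 ++ [(s.1, s.2.2)]))) PySem.Dict.empty).keys = zGs zs := by
  have h := PySem.Dict.keys_foldl_modify_key (zSongs zs) (fun s => s.2.1) ((0 : Int), ([] : List (Int × Int)))
      (fun _ s tv => (tv.1 + s.2.2, tv.2 ++ [(s.1, s.2.2)])) PySem.Dict.empty
  simp only [PySem.Dict.keys_empty] at h
  rw [h]
  have hm : (zSongs zs).map (fun s => s.2.1) = zs.map Prod.fst := by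
    have h2 := congrArg (List.map Prod.fst) (enum_map_snd zs 0)
    rw [List.map_map] at h2
    exact h2
  rw [hm, zGs, PySem.Set.ofList_eq_foldl]
  rfl

-- ---------- stability of the stable sort ----------

theorem insertBy_stable {α : Type} (k1 : α → Int) (k2 : α → Nat) (x : α) :
    ∀ (acc : List α),
    acc.Pairwise (fun a b => toLex (k1 a, k2 a) < toLex (k1 b, k2 b)) →
    (∀ a ∈ acc, k2 a < k2 x) →
    (PySem.List.insertBy (fun a b => decide (k1 a < k1 b)) x acc).Pairwise
      (fun a b => toLex (k1 a, k2 a) < toLex (k1 b, k2 b)) := by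
  intro acc
  induction acc with
  | nil => intro _ _; simp [PySem.List.insertBy]
  | cons y ys ih =>
    intro hp hlt
    rw [List.pairwise_cons] at hp
    obtain ⟨hy, hys⟩ := hp
    rw [PySem.List.insertBy]
    by_cases h : k1 x < k1 y
    · simp only [h, decide_true]
      refine List.Pairwise.cons ?_ (List.Pairwise.cons hy hys)
      intro z hz
      rcases List.mem_cons.mp hz with rfl | hz
      · exact Prod.Lex.toLex_lt_toLex.mpr (Or.inl h)
      · have := hy z hz
        rcases Prod.Lex.toLex_lt_toLex.mp this with h2 | h2
        · exact Prod.Lex.toLex_lt_toLex.mpr (Or.inl (lt_trans h h2))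
        · exact Prod.Lex.toLex_lt_toLex.mpr (Or.inl (lt_of_lt_of_le h (le_of_eq h2.1)))
    · simp only [h, decide_false, Bool.false_eq_true, if_false]
      refine List.Pairwise.cons ?_ (ih hys (fun a ha => hlt a (List.mem_cons_of_mem _ ha)))
      intro z hz
      rw [PySem.List.mem_insertBy] at hz
      rcases hz with rfl | hz
      · rcases lt_or_eq_of_le (not_lt.mp h) with h2 | h2
        · exact Prod.Lex.toLex_lt_toLex.mpr (Or.inl h2)
        · exact Prod.Lex.toLex_lt_toLex.mpr (Or.inr ⟨h2, hlt y (List.mem_cons_self)⟩)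
      · exact hy z hz

theorem foldl_insertBy_stable {α : Type} (k1 : α → Int) (k2 : α → Nat) :
    ∀ (l acc : List α),
    acc.Pairwise (fun a b => toLex (k1 a, k2 a) < toLex (k1 b, k2 b)) →
    (∀ a ∈ acc, ∀ b ∈ l, k2 a < k2 b) →
    l.Pairwise (fun a b => k2 a < k2 b) →
    (l.foldl (fun acc x => PySem.List.insertBy (fun a b => decide (k1 a < k1 b)) x acc) acc).Pairwise
      (fun a b => toLex (k1 a, k2 a) < toLex (k1 b, k2 b)) := by
  intro l
  induction l with
  | nil => intro acc h _ _; simpa using h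
  | cons x t ih =>
    intro acc hacc hcross hl
    rw [List.pairwise_cons] at hl
    simp only [List.foldl_cons]
    refine ih _ (insertBy_stable k1 k2 x acc hacc (fun a ha => hcross a ha x List.mem_cons_self)) ?_ hl.2
    intro a ha b hb
    rw [PySem.List.mem_insertBy] at ha
    rcases ha with rfl | ha
    · exact hl.1 b hb
    · exact hcross a ha b (List.mem_cons_of_mem _ hb)

theorem sorted_stable {α : Type} (k1 : α → Int) (k2 : α → Nat) (xs : List α)
    (h : xs.Pairwise (fun a b => k2 a < k2 b)) :
    (PySem.List.sorted xs k1).Pairwise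
      (fun a b => toLex (k1 a, k2 a) < toLex (k1 b, k2 b)) := by
  rw [PySem.List.sorted_eq_foldl_insertBy]
  exact foldl_insertBy_stable k1 k2 xs [] (by simp) (by simp) h

theorem pairwise_idxOf (l : List String) (h : l.Nodup) :
    l.Pairwise (fun a b => l.idxOf a < l.idxOf b) := by
  rw [List.pairwise_iff_getElem]
  intro i j hi hj hij
  rw [List.Nodup.idxOf_getElem h i hi, List.Nodup.idxOf_getElem h j hj]
  exact hij


-- ---------- small Set/list helpers ----------

theorem set_add_of_mem {s : PySem.Set String} {a : String} (h : a ∈ s) :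
    PySem.Set.add s a = s := by
  simp [PySem.Set.add, PySem.Set.contains, h]

theorem set_add_of_not_mem {s : PySem.Set String} {a : String} (h : a ∉ s) :
    PySem.Set.add s a = s ++ [a] := by
  simp [PySem.Set.add, PySem.Set.contains, h]

theorem set_update_self : ∀ (xs : List String) (s : PySem.Set String),
    (∀ x ∈ xs, x ∈ s) → PySem.Set.update s xs = s := by
  intro xs
  induction xs with
  | nil => intro s _; rfl
  | cons x t ih =>
    intro s h
    have h1 : PySem.Set.add s x = s := set_add_of_mem (h x List.mem_cons_self)
    show List.foldl PySem.Set.add s (x :: t) = s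
    rw [List.foldl_cons, h1]
    exact ih s (fun y hy => h y (List.mem_cons_of_mem _ hy))

theorem zGs_append (zs : List (String × Int)) (x : String × Int) :
    zGs (zs ++ [x]) = PySem.Set.add (zGs zs) x.1 := by
  rw [zGs, zGs, PySem.Set.ofList_eq_foldl, PySem.Set.ofList_eq_foldl,
    List.map_append, List.foldl_append]
  rfl

-- ---------- the A-side pipeline as named stages ----------

def aData0 (zs : List (String × Int)) : PySem.Dict String (Int × List (Int × Int)) :=
  (PySem.List.enumerate zs).foldl (fun d s =>
    if d.contains s.2.1 = false then
      d.insert s.2.1 (s.2.2, [(s.1, s.2.2)])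
    else
      d.modify s.2.1 (0, []) (fun tv => (tv.1 + s.2.2, tv.2 ++ [(s.1, s.2.2)]))) PySem.Dict.empty

def aData1 (zs : List (String × Int)) : PySem.Dict String (Int × List (Int × Int)) :=
  (aData0 zs).keys.foldl (fun d k =>
    d.modify k (0, []) (fun tv => (tv.1, PySem.List.sorted tv.2 (fun x => toLex (-x.2, x.1))))) (aData0 zs)

def aDataL (zs : List (String × Int)) : List (String × Int × List (Int × Int)) :=
  PySem.List.sorted (aData1 zs).items (fun x => -x.2.1)

theorem aRun_eq_stages (zs : List (String × Int)) :
    aRun zs = (PySem.List.pyRange 0 (PySem.List.len (aDataL zs)) 1).foldl (fun ans i =>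
      let e := PySem.List.pyGetD (aDataL zs) i ("", (0, []))
      if PySem.List.len e.2.2 = 1 then
        ans ++ [(PySem.List.pyGetD e.2.2 0 (0, 0)).1]
      else
        (PySem.List.pyRange 0 2 1).foldl (fun ans j =>
          ans ++ [(PySem.List.pyGetD e.2.2 j (0, 0)).1]) ans) [] := rfl

theorem aData0_eq (zs : List (String × Int)) :
    aData0 zs = (zSongs zs).foldl (fun d s => d.modify s.2.1 (0, [])
      (fun tv => (tv.1 + s.2.2, tv.2 ++ [(s.1, s.2.2)]))) PySem.Dict.empty := by
  exact PySem.List.foldl_congr_mem _ _ _ _ (fun acc x _ => a_step_eq acc x)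

theorem aData0_keys (zs : List (String × Int)) : (aData0 zs).keys = zGs zs := by
  rw [aData0_eq]; exact a_data0_keys zs

theorem aData0_nodup (zs : List (String × Int)) : (aData0 zs).keys.Nodup := by
  rw [aData0_keys]; exact PySem.Set.nodup_ofList _

theorem aData0_getD (zs : List (String × Int)) (g : String) :
    (aData0 zs).getD g (0, []) = (zTot zs g, zEnts zs g) := by
  rw [aData0_eq, groupFold]
  simp [zTot, zEnts]

theorem aData1_keys (zs : List (String × Int)) : (aData1 zs).keys = zGs zs := by
  rw [aData1]
  rw [PySem.Dict.keys_foldl_modify_key ((aData0 zs).keys) (fun k => k) ((0 : Int), ([] : List (Int × Int)))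
    (fun _ _ tv => (tv.1, PySem.List.sorted tv.2 (fun x => toLex (-x.2, x.1)))) (aData0 zs)]
  rw [List.map_id', set_update_self _ _ (fun x hx => hx), aData0_keys]

theorem aData1_getD (zs : List (String × Int)) (g : String) (hg : g ∈ zGs zs) :
    (aData1 zs).getD g (0, []) = (zTot zs g, zSents zs g) := by
  rw [aData1, modifyEachD _ _ _ _ _ (aData0_nodup zs)]
  rw [aData0_keys zs, if_pos hg, aData0_getD]
  rfl

theorem aData1_items (zs : List (String × Int)) : (aData1 zs).items = zItems zs := by
  have hnd : (aData1 zs).keys.Nodup := by rw [aData1_keys]; exact PySem.Set.nodup_ofList _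
  rw [PySem.Dict.items_eq_map_keys _ hnd ((0 : Int), ([] : List (Int × Int))), aData1_keys]
  apply List.map_congr_left
  intro g hg
  rw [aData1_getD zs g hg]
  rfl

theorem aDataL_eq (zs : List (String × Int)) : aDataL zs = zDataL zs := by
  rw [aDataL, aData1_items]; rfl

-- ---------- membership facts ----------

theorem zDataL_mem (zs : List (String × Int)) {e : String × Int × List (Int × Int)}
    (he : e ∈ zDataL zs) : ∃ g, g ∈ zGs zs ∧ e = zF zs g := by
  rw [zDataL, PySem.List.mem_sorted, zItems] at he
  obtain ⟨g, hg, hge⟩ := List.mem_map.mp he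
  exact ⟨g, hg, hge.symm⟩

theorem zEnts_ne (zs : List (String × Int)) {g : String} (hg : g ∈ zGs zs) :
    zEnts zs g ≠ [] := by
  rw [zGs, PySem.Set.mem_ofList] at hg
  obtain ⟨z, hz, hz1⟩ := List.mem_map.mp hg
  have hz2 : z ∈ (zSongs zs).map Prod.snd := by rw [zSongs, enum_map_snd]; exact hz
  obtain ⟨s, hs, hsz⟩ := List.mem_map.mp hz2
  have hsf : s ∈ (zSongs zs).filter (fun s => s.2.1 == g) := by
    rw [List.mem_filter]
    exact ⟨hs, by rw [hsz, hz1]; simp⟩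
  have : (s.1, s.2.2) ∈ zEnts zs g := List.mem_map_of_mem hsf
  exact List.ne_nil_of_mem this

theorem zSents_ne (zs : List (String × Int)) {g : String} (hg : g ∈ zGs zs) :
    zSents zs g ≠ [] := by
  rw [zSents, ne_eq, PySem.List.sorted_eq_nil_iff]
  exact zEnts_ne zs hg

theorem zSent_mem (zs : List (String × Int)) {g : String} {x : Int × Int}
    (hx : x ∈ zSents zs g) :
    0 ≤ x.1 ∧ x.1 < zs.length ∧ PySem.List.pyGetD zs x.1 ("", 0) = (g, x.2) := by
  rw [zSents, PySem.List.mem_sorted, zEnts] at hx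
  obtain ⟨s, hs, hsx⟩ := List.mem_map.mp hx
  rw [List.mem_filter] at hs
  obtain ⟨hs1, hs2⟩ := hs
  obtain ⟨k, hk1, hk2⟩ := enum_mem hs1
  have hklen : k < zs.length := (List.getElem?_eq_some_iff.mp hk2).1
  have hget : PySem.List.pyGetD zs (k : Int) ("", 0) = s.2 := by
    rw [PySem.List.pyGetD_natCast, List.getD_eq_getElem?_getD, hk2]
    rfl
  have hx1 : x.1 = (k : Int) := by rw [← hsx]; simpa using hk1
  have h21 : s.2.1 = g := by simpa using hs2
  have hx2 : x.2 = s.2.2 := by rw [← hsx]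
  refine ⟨by omega, by omega, ?_⟩
  rw [hx1, hget, ← h21, hx2]

-- ---------- take-2 block lemma ----------

theorem blk_eq (L : List (Int × Int)) (h : L ≠ []) (ans : List Int) :
    (if PySem.List.len L = 1 then ans ++ [(PySem.List.pyGetD L 0 (0, 0)).1]
     else (PySem.List.pyRange 0 2 1).foldl (fun ans j => ans ++ [(PySem.List.pyGetD L j (0, 0)).1]) ans)
    = ans ++ (L.take 2).map (fun x => x.1) := by
  obtain ⟨x, l', rfl⟩ := List.exists_cons_of_ne_nil h
  cases l' with
  | nil =>
    rw [if_pos (by rw [PySem.List.len_eq]; rfl)]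
    rw [PySem.List.pyGetD_zero_cons]
    rfl
  | cons y t =>
    rw [if_neg (by rw [PySem.List.len_eq]; simp; omega)]
    rw [show PySem.List.pyRange 0 2 1 = [0, 1] from by decide]
    simp only [List.foldl_cons, List.foldl_nil]
    rw [PySem.List.pyGetD_zero_cons]
    rw [show (1 : Int) = ((1 : Nat) : Int) from rfl, PySem.List.pyGetD_natCast]
    simp [List.take]

theorem flatMap_range_getD {α β : Type} (f : α → List β) (dflt : α) :
    ∀ (l : List α),
    (List.range l.length).flatMap (fun k => f (l.getD k dflt)) = l.flatMap f := by
  intro l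
  induction l with
  | nil => simp
  | cons x t ih =>
    rw [List.length_cons, List.range_succ_eq_map, List.flatMap_cons, List.flatMap_map]
    simp only [List.getD_cons_zero, Nat.succ_eq_add_one, List.getD_cons_succ]
    rw [ih, List.flatMap_cons]

theorem aRun_eq (zs : List (String × Int)) :
    aRun zs = (zDataL zs).flatMap (fun e => (e.2.2.take 2).map (fun x => x.1)) := by
  rw [aRun_eq_stages, aDataL_eq]
  have hcongr : ∀ (acc : List Int), ∀ i ∈ PySem.List.pyRange 0 (PySem.List.len (zDataL zs)) 1,
      (fun (ans : List Int) (i : Int) =>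
        let e := PySem.List.pyGetD (zDataL zs) i ("", (0, []))
        if PySem.List.len e.2.2 = 1 then
          ans ++ [(PySem.List.pyGetD e.2.2 0 (0, 0)).1]
        else
          (PySem.List.pyRange 0 2 1).foldl (fun ans j =>
            ans ++ [(PySem.List.pyGetD e.2.2 j (0, 0)).1]) ans) acc i
      = acc ++ (((PySem.List.pyGetD (zDataL zs) i ("", (0, []))).2.2.take 2).map (fun x => x.1)) := by
    intro acc i hi
    rw [PySem.List.mem_pyRange_one, PySem.List.len_eq] at hi
    have hmem : PySem.List.pyGetD (zDataL zs) i ("", (0, [])) ∈ zDataL zs := by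
      apply PySem.List.pyGetD_mem
      simp only [PySem.Raise.InRange]
      omega
    obtain ⟨g, hg, hge⟩ := zDataL_mem zs hmem
    exact blk_eq _ (by rw [hge]; exact zSents_ne zs hg) acc
  rw [PySem.List.foldl_congr_mem _ _
    (fun acc i => acc ++ (((PySem.List.pyGetD (zDataL zs) i ("", (0, []))).2.2.take 2).map (fun x => x.1)))
    _ hcongr]
  rw [PySem.List.foldl_append_eq_flatMap, List.nil_append]
  rw [PySem.List.len_eq, PySem.List.pyRange_one]
  simp only [zero_add, sub_zero, Int.toNat_natCast]
  rw [List.flatMap_map]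
  simp only [PySem.List.pyGetD_natCast]
  exact flatMap_range_getD (fun e => (e.2.2.take 2).map (fun x => x.1)) ("", ((0 : Int), ([] : List (Int × Int)))) (zDataL zs)

-- ---------- B's dictionaries ----------

def zTotZ (zs : List (String × Int)) (g : String) : Int :=
  ((zs.filter (fun z => z.1 == g)).map (fun z => z.2)).sum

theorem zTot_eq (zs : List (String × Int)) (g : String) : zTot zs g = zTotZ zs g := by
  rw [zTot, zTotZ, zSongs]
  exact congrArg List.sum (enum_filter_map g zs 0)

theorem b_state (zs : List (String × Int)) :
    (∀ g, (bDicts zs).1.getD g 0 = zTotZ zs g)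
    ∧ (bDicts zs).2.keys = zGs zs
    ∧ (∀ g ∈ zGs zs, (bDicts zs).2.getD g 0 = ((zGs zs).idxOf g : Int))
    ∧ (bDicts zs).2.size = (zGs zs).length := by
  induction zs using List.reverseRecOn with
  | nil =>
    exact ⟨fun g => by simp [bDicts, zTotZ], rfl, fun g hg => by simp [zGs, PySem.Set.ofList_eq_foldl] at hg, rfl⟩
  | append_singleton l x ih =>
    obtain ⟨h1, h2, h3, h4⟩ := ih
    have hfold : bDicts (l ++ [x]) = bStep (bDicts l) x := by
      rw [bDicts, bDicts, List.foldl_append, List.foldl_cons, List.foldl_nil]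
    rw [hfold]
    simp only [bStep]
    by_cases hc : (bDicts l).2.contains x.1 = false
    · have hmemgs : x.1 ∉ zGs l := by
        intro hmem
        rw [PySem.Dict.contains_eq_decide_mem_keys, h2] at hc
        simp [hmem] at hc
      rw [if_pos hc]
      have hGs : zGs (l ++ [x]) = zGs l ++ [x.1] := by
        rw [zGs_append, set_add_of_not_mem hmemgs]
      refine ⟨?_, ?_, ?_, ?_⟩
      · intro g
        rw [PySem.Dict.getD_modify]
        by_cases hgx : g = x.1
        · subst hgx
          rw [if_pos rfl, PySem.Dict.getD_insert_self]
          have hfilter : l.filter (fun z => z.1 == x.1) = [] := by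
            rw [List.filter_eq_nil_iff]
            intro z hz hzg
            exact hmemgs (by
              rw [zGs, PySem.Set.mem_ofList]
              exact List.mem_map.mpr ⟨z, hz, by simpa using hzg⟩)
          rw [zTotZ, List.filter_append, hfilter, List.nil_append]
          simp
        · rw [if_neg hgx, PySem.Dict.getD_insert_of_ne _ _ _ hgx, h1 g]
          have hfx : ([x].filter (fun z => z.1 == g)) = [] := by
            simp only [List.filter_cons, List.filter_nil]
            have : ¬ (x.1 == g) = true := by simpa using fun e => hgx e.symm
            simp [this]
          rw [zTotZ, zTotZ, List.filter_append, hfx, List.append_nil]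
      · rw [PySem.Dict.keys_insert_of_not_contains _ _ hc, h2, hGs]
      · intro g hg
        rw [hGs] at hg
        rw [hGs]
        rcases List.mem_append.mp hg with hgl | hgx
        · have hne : g ≠ x.1 := fun e => hmemgs (e ▸ hgl)
          rw [PySem.Dict.getD_insert_of_ne _ _ _ hne, h3 g hgl, List.idxOf_append, if_pos hgl]
        · have hgx : g = x.1 := by simpa using hgx
          subst hgx
          rw [PySem.Dict.getD_insert_self, List.idxOf_append, if_neg hmemgs]
          simp [h4]
      · rw [PySem.Dict.size_insert, if_neg (by simp [hc]), h4, hGs, List.length_append]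
        simp
    · rw [if_neg hc]
      have hmemgs : x.1 ∈ zGs l := by
        rw [PySem.Dict.contains_eq_decide_mem_keys, h2] at hc
        simpa using hc
      have hGs : zGs (l ++ [x]) = zGs l := by rw [zGs_append, set_add_of_mem hmemgs]
      refine ⟨?_, by rw [hGs]; exact h2, ?_, by rw [hGs]; exact h4⟩
      · intro g
        rw [PySem.Dict.getD_modify]
        by_cases hgx : g = x.1
        · subst hgx
          rw [if_pos rfl, h1, zTotZ, zTotZ, List.filter_append]
          simp
        · rw [if_neg hgx, h1]
          have hfx : ([x].filter (fun z => z.1 == g)) = [] := by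
            simp only [List.filter_cons, List.filter_nil]
            have : ¬ (x.1 == g) = true := by simpa using fun e => hgx e.symm
            simp [this]
          rw [zTotZ, zTotZ, List.filter_append, hfx, List.append_nil]
      · intro g hg
        rw [hGs] at hg
        rw [hGs]
        exact h3 g hg

-- ---------- partition of the song list by genre ----------

theorem partition_perm {α : Type} (key : α → String) :
    ∀ (gs : List String) (l : List α), gs.Nodup → (∀ x ∈ l, key x ∈ gs) →
    (gs.flatMap (fun g => l.filter (fun x => key x == g))).Perm l := by
  intro gs
  induction gs with
  | nil =>
    intro l _ hcov
    have hl : l = [] := by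
      cases l with
      | nil => rfl
      | cons a t => exact absurd (hcov a List.mem_cons_self) List.not_mem_nil
    subst hl; simp
  | cons g gt ih =>
    intro l hnd hcov
    rw [List.nodup_cons] at hnd
    rw [List.flatMap_cons]
    have hstep : gt.flatMap (fun g' => l.filter (fun x => key x == g')) =
        gt.flatMap (fun g' => (l.filter (fun x => !(key x == g))).filter (fun x => key x == g')) := by
      rw [List.flatMap_def, List.flatMap_def]
      congr 1
      apply List.map_congr_left
      intro g' hg'
      rw [List.filter_filter]
      apply List.filter_congr
      intro x _
      by_cases hx : key x = g'
      · have hg'g : g' ≠ g := fun e => hnd.1 (e ▸ hg')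
        have hxg : key x ≠ g := fun e => hg'g (by rw [← hx, e])
        simp [hx, hg'g]
      · simp [hx]
    rw [hstep]
    have hperm := ih (l.filter (fun x => !(key x == g))) hnd.2 (by
      intro x hx
      rw [List.mem_filter] at hx
      rcases List.mem_cons.mp (hcov x hx.1) with h | h
      · exact absurd h (by simpa using hx.2)
      · exact h)
    exact (hperm.append_left _).trans (List.filter_append_perm _ l)

theorem partition_perm_songs (zs : List (String × Int)) :
    (((zGs zs).flatMap (fun g => (zSongs zs).filter (fun s => s.2.1 == g)))).Perm (zSongs zs) := by
  have hcov : ∀ s ∈ zSongs zs, s.2.1 ∈ zGs zs := by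
    intro s hs
    rw [zGs, PySem.Set.mem_ofList]
    have hmem : s.2 ∈ (zSongs zs).map Prod.snd := List.mem_map_of_mem hs
    rw [zSongs, enum_map_snd] at hmem
    exact List.mem_map.mpr ⟨s.2, hmem, rfl⟩
  exact partition_perm (fun s => s.2.1) (zGs zs) (zSongs zs) (PySem.Set.nodup_ofList _) hcov

theorem b_perm (zs : List (String × Int)) :
    ((zDataL zs).flatMap (fun e => (e.2.2).map (fun x => x.1))).Perm
      (PySem.List.pyRange 0 (PySem.List.len zs) 1) := by
  have h1 : ((zDataL zs).flatMap (fun e => (e.2.2).map (fun x => x.1))).Perm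
      ((zItems zs).flatMap (fun e => (e.2.2).map (fun x => x.1))) :=
    List.Perm.flatMap (PySem.List.sorted_perm _ _ _) (fun a _ => List.Perm.refl _)
  have h2 : (zItems zs).flatMap (fun e => (e.2.2).map (fun x => x.1)) =
      (zGs zs).flatMap (fun g => (zSents zs g).map (fun x => x.1)) := by
    rw [zItems, List.flatMap_map]
    rfl
  have h3 : ((zGs zs).flatMap (fun g => (zSents zs g).map (fun x => x.1))).Perm
      ((zGs zs).flatMap (fun g => (zEnts zs g).map (fun x => x.1))) :=
    List.Perm.flatMap (List.Perm.refl _) (fun g _ => List.Perm.map _ (PySem.List.sorted_perm _ _ _))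
  have h4 : (zGs zs).flatMap (fun g => (zEnts zs g).map (fun x => x.1)) =
      ((zGs zs).flatMap (fun g => (zSongs zs).filter (fun s => s.2.1 == g))).map (fun s => s.1) := by
    rw [List.map_flatMap]
    congr 1
    funext g
    rw [zEnts, List.map_map]
    rfl
  have h5 : (((zGs zs).flatMap (fun g => (zSongs zs).filter (fun s => s.2.1 == g))).map (fun s => s.1)).Perm
      ((zSongs zs).map (fun s => s.1)) := List.Perm.map _ (partition_perm_songs zs)
  have h6 : (zSongs zs).map (fun s : Int × String × Int => s.1) =
      PySem.List.pyRange 0 (PySem.List.len zs) 1 := by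
    rw [PySem.List.len_eq]
    have he := enum_map_fst zs 0
    rw [zero_add] at he
    exact he
  exact ((h2 ▸ h1).trans ((h4 ▸ h3).trans (h6 ▸ h5)))

-- ---------- per-genre strict order ----------

theorem zEnts_fst_nodup (zs : List (String × Int)) (g : String) :
    ((zEnts zs g).map (fun x => x.1)).Nodup := by
  have h0 : ((zSongs zs).map (fun s : Int × String × Int => s.1)).Nodup := by
    have he := enum_map_fst zs 0
    rw [zero_add] at he
    rw [zSongs]
    rw [show (fun s : Int × String × Int => s.1) = Prod.fst from rfl, he]
    exact PySem.List.nodup_pyRange_one _ _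
  have hsub : (((zSongs zs).filter (fun s => s.2.1 == g)).map (fun s : Int × String × Int => s.1)).Sublist
      ((zSongs zs).map (fun s : Int × String × Int => s.1)) :=
    List.Sublist.map _ List.filter_sublist
  have hnd := h0.sublist hsub
  rw [zEnts, List.map_map]
  exact hnd

theorem zSents_fst_nodup (zs : List (String × Int)) (g : String) :
    ((zSents zs g).map (fun x => x.1)).Nodup := by
  have hperm : ((zSents zs g).map (fun x => x.1)).Perm ((zEnts zs g).map (fun x => x.1)) :=
    List.Perm.map _ (PySem.List.sorted_perm _ _ _)
  exact hperm.nodup_iff.mpr (zEnts_fst_nodup zs g)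

theorem zSents_pairwise (zs : List (String × Int)) (g : String) :
    (zSents zs g).Pairwise (fun a b => toLex (-a.2, a.1) < toLex (-b.2, b.1)) := by
  have hle : (zSents zs g).Pairwise
      (fun a b => toLex (-a.2, a.1) ≤ toLex (-b.2, b.1)) := by
    rw [zSents]
    exact PySem.List.sorted_pairwise (zEnts zs g) (fun x => toLex (-x.2, x.1))
  have hne : (zSents zs g).Pairwise (fun a b => a.1 ≠ b.1) := by
    have hnd := zSents_fst_nodup zs g
    rw [List.Nodup, List.pairwise_map] at hnd
    exact hnd
  refine (hle.and hne).imp ?_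
  rintro a b ⟨hab, hne⟩
  refine lt_of_le_of_ne hab ?_
  intro he
  have hpair : ((-a.2 : Int), a.1) = ((-b.2 : Int), b.1) := by simpa using he
  exact hne (congrArg Prod.snd hpair)

theorem dataL_pairwise (zs : List (String × Int)) :
    (zDataL zs).Pairwise (fun a b =>
      toLex (-a.2.1, (zGs zs).idxOf a.1) < toLex (-b.2.1, (zGs zs).idxOf b.1)) := by
  rw [zDataL]
  refine sorted_stable (fun e : String × Int × List (Int × Int) => -e.2.1) (fun e => (zGs zs).idxOf e.1) _ ?_
  rw [zItems, List.pairwise_map]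
  simpa [zF] using pairwise_idxOf (zGs zs) (PySem.Set.nodup_ofList _)

theorem bKey_at (zs : List (String × Int)) {g : String} {x : Int × Int}
    (hg : g ∈ zGs zs) (hx : x ∈ zSents zs g) :
    bKey zs x.1 = toLex (-(zTot zs g),
      toLex ((((zGs zs).idxOf g : Nat) : Int), toLex (-x.2, x.1))) := by
  obtain ⟨_, _, hget⟩ := zSent_mem zs hx
  obtain ⟨h1, _, h3, _⟩ := b_state zs
  rw [bKey, hget]
  dsimp only
  rw [h1, h3 g hg, zTot_eq]

theorem b_sorted (zs : List (String × Int)) :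
    PySem.List.sorted (PySem.List.pyRange 0 (PySem.List.len zs) 1) (bKey zs) =
      (zDataL zs).flatMap (fun e => (e.2.2).map (fun x => x.1)) := by
  apply PySem.List.sorted_eq_of_perm_of_pairwise_lt
  · exact b_perm zs
  · rw [List.flatMap_def, List.pairwise_flatten]
    constructor
    · intro blk hblk
      obtain ⟨e, he, hbe⟩ := List.mem_map.mp hblk
      obtain ⟨g, hg, hge⟩ := zDataL_mem zs he
      subst hbe
      rw [List.pairwise_map, hge]
      simp only [zF]
      refine List.Pairwise.imp_of_mem ?_ (zSents_pairwise zs g)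
      intro a b ha hb hab
      rw [bKey_at zs hg ha, bKey_at zs hg hb]
      rw [Prod.Lex.toLex_lt_toLex]
      refine Or.inr ⟨rfl, ?_⟩
      rw [Prod.Lex.toLex_lt_toLex]
      exact Or.inr ⟨rfl, hab⟩
    · rw [List.pairwise_map]
      refine List.Pairwise.imp_of_mem ?_ (dataL_pairwise zs)
      intro e1 e2 he1 he2 h12 u hu v hv
      obtain ⟨g1, hg1, hge1⟩ := zDataL_mem zs he1
      obtain ⟨g2, hg2, hge2⟩ := zDataL_mem zs he2
      subst hge1; subst hge2
      simp only [zF] at hu hv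
      obtain ⟨a, ha, hau⟩ := List.mem_map.mp hu
      obtain ⟨b, hb, hbv⟩ := List.mem_map.mp hv
      subst hau; subst hbv
      rw [bKey_at zs hg1 ha, bKey_at zs hg2 hb]
      rw [Prod.Lex.toLex_lt_toLex] at h12
      rw [Prod.Lex.toLex_lt_toLex]
      rcases h12 with h | ⟨heq, hlt⟩
      · exact Or.inl (by simpa [zF] using h)
      · refine Or.inr ⟨by simpa [zF] using heq, ?_⟩
        rw [Prod.Lex.toLex_lt_toLex]
        refine Or.inl ?_
        have hlt' : (zGs zs).idxOf g1 < (zGs zs).idxOf g2 := by simpa [zF] using hlt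
        show (((zGs zs).idxOf g1 : Nat) : Int) < (((zGs zs).idxOf g2 : Nat) : Int)
        exact_mod_cast hlt'

-- ---------- the counting pass ----------

theorem block_pass (zs : List (String × Int)) (g : String) :
    ∀ (blk : List Int) (ans : List Int) (cnt : PySem.Dict String Int) (c : Nat),
    (∀ i ∈ blk, (PySem.List.pyGetD zs i ("", 0)).1 = g) → cnt.getD g 0 = (c : Int) →
    ((blk.foldl (bPStep zs) (ans, cnt)).1 = ans ++ blk.take (2 - c)
      ∧ ∀ g', g' ≠ g → ((blk.foldl (bPStep zs) (ans, cnt)).2.getD g' 0 = cnt.getD g' 0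
          ∧ (blk.foldl (bPStep zs) (ans, cnt)).2.contains g' = cnt.contains g')) := by
  intro blk
  induction blk with
  | nil =>
    intro ans cnt c _ _
    exact ⟨by simp, fun g' _ => ⟨rfl, rfl⟩⟩
  | cons i t ih =>
    intro ans cnt c hgen hc
    have hgi : (PySem.List.pyGetD zs i ("", 0)).1 = g := hgen i List.mem_cons_self
    rw [List.foldl_cons]
    by_cases hlt : c < 2
    · have hcond : cnt.getD (PySem.List.pyGetD zs i ("", 0)).1 0 < 2 := by
        rw [hgi, hc]; exact_mod_cast hlt
      have hstep : bPStep zs (ans, cnt) i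
          = (ans ++ [i], cnt.insert g (cnt.getD g 0 + 1)) := by
        rw [bPStep]
        dsimp only
        rw [if_pos hcond, hgi]
      rw [hstep]
      have hins : (cnt.insert g (cnt.getD g 0 + 1)).getD g 0 = (((c + 1 : Nat)) : Int) := by
        rw [PySem.Dict.getD_insert_self, hc]; push_cast; ring
      obtain ⟨ha, hb⟩ := ih (ans ++ [i]) _ (c + 1)
        (fun j hj => hgen j (List.mem_cons_of_mem _ hj)) hins
      constructor
      · rw [ha]
        have h2c : 2 - c = (2 - (c + 1)) + 1 := by omega
        rw [h2c, List.take_succ_cons, List.append_assoc]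
        rfl
      · intro g' hg'
        obtain ⟨hd1, hd2⟩ := hb g' hg'
        rw [hd1, hd2, PySem.Dict.getD_insert_of_ne _ _ _ hg', PySem.Dict.contains_insert]
        exact ⟨rfl, by simp [hg']⟩
    · have hcond : ¬ cnt.getD (PySem.List.pyGetD zs i ("", 0)).1 0 < 2 := by
        rw [hgi, hc]; exact_mod_cast hlt
      have hstep : bPStep zs (ans, cnt) i = (ans, cnt) := by
        rw [bPStep]
        dsimp only
        rw [if_neg hcond]
      rw [hstep]
      obtain ⟨ha, hb⟩ := ih ans cnt c (fun j hj => hgen j (List.mem_cons_of_mem _ hj)) hc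
      have h2c : 2 - c = 0 := by omega
      exact ⟨by rw [ha, h2c]; simp, hb⟩

theorem pass_flatMap (zs : List (String × Int)) :
    ∀ (bs : List (String × List Int)) (ans : List Int) (cnt : PySem.Dict String Int),
    (∀ b ∈ bs, ∀ i ∈ b.2, (PySem.List.pyGetD zs i ("", 0)).1 = b.1) →
    (bs.map Prod.fst).Nodup →
    (∀ b ∈ bs, cnt.contains b.1 = false) →
    ((bs.flatMap (fun b => b.2)).foldl (bPStep zs) (ans, cnt)).1
      = ans ++ bs.flatMap (fun b => b.2.take 2) := by
  intro bs
  induction bs with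
  | nil => intro ans cnt _ _ _; simp
  | cons b bt ih =>
    intro ans cnt hgen hnd hcnt
    rw [List.flatMap_cons, List.foldl_append]
    rw [List.map_cons, List.nodup_cons] at hnd
    have hc0 : cnt.getD b.1 0 = ((0 : Nat) : Int) := by
      rw [PySem.Dict.getD_of_not_contains _ _ (hcnt b List.mem_cons_self)]; rfl
    obtain ⟨h1, h2⟩ := block_pass zs b.1 b.2 ans cnt 0 (hgen b List.mem_cons_self) hc0
    have hne : ∀ b' ∈ bt, b'.1 ≠ b.1 := by
      intro b' hb' e
      exact hnd.1 (List.mem_map.mpr ⟨b', hb', e⟩)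
    have hst : b.2.foldl (bPStep zs) (ans, cnt)
        = ((b.2.foldl (bPStep zs) (ans, cnt)).1, (b.2.foldl (bPStep zs) (ans, cnt)).2) := rfl
    rw [hst]
    rw [ih _ _ (fun b' hb' => hgen b' (List.mem_cons_of_mem _ hb')) hnd.2
      (fun b' hb' => by
        rw [(h2 b'.1 (hne b' hb')).2]
        exact hcnt b' (List.mem_cons_of_mem _ hb'))]
    rw [h1, List.flatMap_cons, List.append_assoc]

theorem bRun_eq (zs : List (String × Int)) :
    bRun zs = (zDataL zs).flatMap (fun e => (e.2.2.take 2).map (fun x => x.1)) := by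
  rw [bRun, b_sorted]
  have hform : (zDataL zs).flatMap (fun e => (e.2.2).map (fun x => x.1)) =
      ((zDataL zs).map (fun e : String × Int × List (Int × Int) => (e.1, (e.2.2).map (fun x => x.1)))).flatMap (fun b => b.2) := by
    rw [List.flatMap_map]
  rw [hform]
  rw [pass_flatMap zs _ [] PySem.Dict.empty ?_ ?_ ?_]
  · rw [List.nil_append, List.flatMap_map]
    congr 1
    funext e
    dsimp only
    rw [← List.map_take]
  · intro b hb i hi
    obtain ⟨e, he, hbe⟩ := List.mem_map.mp hb
    obtain ⟨g, hg, hge⟩ := zDataL_mem zs he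
    subst hbe
    dsimp only at hi ⊢
    obtain ⟨a, ha, hai⟩ := List.mem_map.mp hi
    obtain ⟨_, _, hget⟩ := zSent_mem zs (by rw [hge] at ha; exact ha)
    rw [← hai, hget, hge]
    rfl
  · have hmap : ((zDataL zs).map (fun e : String × Int × List (Int × Int) => (e.1, (e.2.2).map (fun x => x.1)))).map Prod.fst
        = (zDataL zs).map (fun e => e.1) := by
      rw [List.map_map]
      rfl
    rw [hmap]
    have hperm : ((zDataL zs).map (fun e => e.1)).Perm ((zItems zs).map (fun e => e.1)) :=
      List.Perm.map _ (PySem.List.sorted_perm _ _ _)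
    have hitems : (zItems zs).map (fun e => e.1) = zGs zs := by
      rw [zItems, List.map_map]
      exact List.map_id' _
    rw [hperm.nodup_iff, hitems]
    exact PySem.Set.nodup_ofList _
  · intro b _
    exact PySem.Dict.contains_empty _

-- ===== assembled main lemmas (details below) =====

theorem main_eq (zs : List (String × Int)) : aRun zs = bRun zs := by
  rw [aRun_eq, bRun_eq]

-- ===== VERDICT (by name: the statement is the Claim_ definition above) =====
theorem solution_spec : Claim_equal_solution := by
  intro genres plays _
  unfold Spec_solution
  rw [aRun_spec, bRun_spec, main_eq]
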